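-- pv_equiv track=rewrite | github.com/akvir-k/IMDB-website | task6.py | Analyse_movies_language
-- ===== SOURCE A (Python) =====
-- def Analyse_movies_language(movie_list):
-- 	Language_list={}
--
-- 	for i in movie_list:
-- 		for j in i['Language']:
-- 			if j not in Language_list:
-- 				Language_list[j]=1
-- 			else:
-- 				Language_list[j]+=1
-- 	return Language_list
-- ===== SOURCE B (Python) =====
-- def Analyse_movies_language(movie_list):
-- 	langs = [j for movie in movie_list for j in movie['Language']]
-- 	return {j: langs.count(j) for j in dict.fromkeys(langs)}
-- ===== Notes on version B (the rewrite author's own statement) =====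
-- stated objective: alternative
-- what changed: Replaces the incremental membership-test-and-update dict loop with a two-phase decomposition: flatten all languages into one list, then build the result in one comprehension over the first-occurrence-ordered distinct languages with list.count for each.
import Mathlib
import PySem

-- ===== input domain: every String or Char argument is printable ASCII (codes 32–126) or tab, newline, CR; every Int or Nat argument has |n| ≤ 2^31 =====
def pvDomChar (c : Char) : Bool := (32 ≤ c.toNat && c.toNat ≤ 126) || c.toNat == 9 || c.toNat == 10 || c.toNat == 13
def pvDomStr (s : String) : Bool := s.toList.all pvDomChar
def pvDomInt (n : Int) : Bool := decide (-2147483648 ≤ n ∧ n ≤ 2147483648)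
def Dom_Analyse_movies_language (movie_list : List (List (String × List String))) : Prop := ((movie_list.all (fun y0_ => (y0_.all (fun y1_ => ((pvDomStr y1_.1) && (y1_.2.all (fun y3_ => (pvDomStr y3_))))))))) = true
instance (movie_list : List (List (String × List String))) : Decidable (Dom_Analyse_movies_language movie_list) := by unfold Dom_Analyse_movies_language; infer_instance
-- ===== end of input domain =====

-- B replaces A's incremental membership-test counting dict with flatten + ordered dedup + per-key count (alternative decomposition, not faster).

-- ===== PORT A =====
def Analyse_movies_language (movie_list : List (List (String × List String))) : List (String × Int) :=
  (movie_list.foldl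
    (fun d i =>
      ((PySem.Dict.mk i).getD "Language" []).foldl
        (fun d j =>
          if !(d.contains j) then d.insert j 1
          else d.insert j (d.getD j 0 + 1))
        d)
    PySem.Dict.empty).items

-- ===== PORT B =====
def Analyse_movies_language_alt (movie_list : List (List (String × List String))) : List (String × Int) :=
  let langs := movie_list.flatMap (fun movie => (PySem.Dict.mk movie).getD "Language" [])
  (PySem.List.dedup langs).map (fun j => (j, (PySem.List.count langs j : Int)))

-- ===== PRECONDITION & SPEC =====
-- Pre_ excludes exactly the inputs where some movie lacks a 'Language' key, on which A raises KeyError.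
def Pre_Analyse_movies_language (movie_list : List (List (String × List String))) : Prop :=
  ∀ i ∈ movie_list, "Language" ∈ i.map Prod.fst
instance (movie_list : List (List (String × List String))) : Decidable (Pre_Analyse_movies_language movie_list) := by unfold Pre_Analyse_movies_language; infer_instance
def pvWitness_Analyse_movies_language : (List (List (String × List String))) :=
  [[("Language", ["English", "French"])], [("Language", ["English"]), ("Year", [])]]
def Spec_Analyse_movies_language (movie_list : List (List (String × List String))) (out : List (String × Int)) : Prop := out = Analyse_movies_language_alt movie_list
instance (movie_list : List (List (String × List String))) (out : List (String × Int)) : Decidable (Spec_Analyse_movies_language movie_list out) := by unfold Spec_Analyse_movies_language; infer_instance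

-- ===== CLAIM (what is proved, stated in full; the proofs are below) =====
def Claim_equal_Analyse_movies_language : Prop := ∀ (movie_list : List (List (String × List String))), Dom_Analyse_movies_language movie_list → Pre_Analyse_movies_language movie_list → Spec_Analyse_movies_language movie_list (Analyse_movies_language movie_list)

-- ===== LEMMAS AND PROOFS =====

-- A's counting body equals the canonical counter step on every dict and key.
theorem pv_body_eq (d : PySem.Dict String Int) (j : String) :
    (if !(d.contains j) then d.insert j 1 else d.insert j (d.getD j 0 + 1))
      = d.insert j (d.getD j 0 + 1) := by
  by_cases h : d.contains j = true
  · simp [h]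
  · simp [h, PySem.Dict.getD_of_not_contains d 0 (by simpa using h)]

-- ===== VERDICT (by name: the statement is the Claim_ definition above) =====
theorem Analyse_movies_language_spec : Claim_equal_Analyse_movies_language := by
  intro movie_list _ _
  unfold Spec_Analyse_movies_language Analyse_movies_language Analyse_movies_language_alt
  rw [← List.foldl_flatMap]
  have hb : (movie_list.flatMap (fun movie => (PySem.Dict.mk movie).getD "Language" [])).foldl
      (fun (d : PySem.Dict String Int) j =>
        if !(d.contains j) then d.insert j 1 else d.insert j (d.getD j 0 + 1))
      PySem.Dict.empty
      = (movie_list.flatMap (fun movie => (PySem.Dict.mk movie).getD "Language" [])).foldl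
      (fun d j => d.insert j (d.getD j 0 + 1)) PySem.Dict.empty := by
    exact List.foldl_ext _ _ _ (fun d j _ => pv_body_eq d j)
  rw [hb, PySem.Dict.foldl_insert_getD_add_one_eq_counter, PySem.Dict.items_counter]
  simp [PySem.List.dedup_eq_ofList, PySem.List.count_eq]
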